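-- pv_equiv track=rewrite | github.com/radoslawrolka/Introduction_to_Computer_Science_Course | zestaw_2/z3_d.py | na_binary
-- ===== SOURCE A (Python) =====
-- def na_binary(x):
--     i = 0
--     a = 0
--     while x > 0:
--         if x % 2 != 0:
--             a += 10 ** i
--         i += 1
--         x = x // 2
--     return a
-- ===== SOURCE B (Python) =====
-- def na_binary(x):
--     if x <= 0:
--         return 0
--     return na_binary(x // 2) * 10 + x % 2
-- ===== Notes on version B (the rewrite author's own statement) =====
-- stated objective: simpler
-- what changed: Replaced the bottom-up while-loop (counter plus power-of-ten accumulator) by the standard recursive base-conversion recurrence that emits digits most-significant-first via the call stack.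
import Mathlib
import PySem

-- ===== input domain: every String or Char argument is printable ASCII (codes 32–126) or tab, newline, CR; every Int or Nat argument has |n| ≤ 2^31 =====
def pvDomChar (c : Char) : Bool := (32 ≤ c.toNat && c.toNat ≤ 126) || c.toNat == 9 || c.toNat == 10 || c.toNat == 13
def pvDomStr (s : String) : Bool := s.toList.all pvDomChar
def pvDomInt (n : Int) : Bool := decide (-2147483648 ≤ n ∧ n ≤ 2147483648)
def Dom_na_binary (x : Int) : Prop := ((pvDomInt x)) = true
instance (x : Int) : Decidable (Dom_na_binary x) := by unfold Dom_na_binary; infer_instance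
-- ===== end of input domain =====

-- B replaces the bottom-up while-loop (counter i, accumulator a += 10**i) by the
-- standard recursive base-conversion recurrence; objective: simpler.

-- ===== PORT A =====
-- the while loop, state (x, i, a); terminates because x.toNat decreases while x > 0
def na_binary_loop (x : Int) (i : Nat) (a : Int) : Int :=
  if h : x > 0 then
    na_binary_loop (PySem.Int.floordiv x 2) (i + 1)
      (if PySem.Int.mod x 2 ≠ 0 then a + 10 ^ i else a)
  else a
termination_by x.toNat
decreasing_by
  have := PySem.Int.floordiv_eq_ediv_of_pos (a := x) (b := 2) (by omega)
  rw [this]; omega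

def na_binary (x : Int) : Int := na_binary_loop x 0 0

-- ===== PORT B =====
def na_binary_alt (x : Int) : Int :=
  if h : x ≤ 0 then 0
  else na_binary_alt (PySem.Int.floordiv x 2) * 10 + PySem.Int.mod x 2
termination_by x.toNat
decreasing_by
  have := PySem.Int.floordiv_eq_ediv_of_pos (a := x) (b := 2) (by omega)
  rw [this]; omega

-- ===== PRECONDITION & SPEC =====
def Spec_na_binary (x : Int) (out : Int) : Prop := out = na_binary_alt x
instance (x : Int) (out : Int) : Decidable (Spec_na_binary x out) := by unfold Spec_na_binary; infer_instance

-- ===== CLAIM (what is proved, stated in full; the proofs are below) =====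
def Claim_equal_na_binary : Prop := ∀ (x : Int), Dom_na_binary x → Spec_na_binary x (na_binary x)

-- ===== LEMMAS AND PROOFS =====
theorem na_binary_loop_eq (n : Nat) (x : Int) (hx : x.toNat ≤ n) (i : Nat) (a : Int) :
    na_binary_loop x i a = a + 10 ^ i * na_binary_alt x := by
  induction n generalizing x i a with
  | zero =>
    have hx0 : x ≤ 0 := by omega
    rw [na_binary_loop, na_binary_alt]
    simp [not_lt.mpr hx0, hx0]
  | succ n ih =>
    by_cases h : x > 0
    · have hd : PySem.Int.floordiv x 2 = x / 2 :=
        PySem.Int.floordiv_eq_ediv_of_pos (by omega)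
      have hm : PySem.Int.mod x 2 = x % 2 :=
        PySem.Int.mod_eq_emod_of_pos (by omega)
      have hle : (PySem.Int.floordiv x 2).toNat ≤ n := by rw [hd]; omega
      rw [na_binary_loop, na_binary_alt]
      simp only [h, not_le.mpr h, dif_pos, dif_neg, not_false_iff]
      rw [ih _ hle]
      rw [hm]
      have hcases : x % 2 = 0 ∨ x % 2 = 1 := by omega
      rcases hcases with h0 | h1
      · simp [h0]; ring
      · simp [h1, pow_succ]; ring
    · have hx0 : x ≤ 0 := by omega
      rw [na_binary_loop, na_binary_alt]
      simp [h, hx0]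

-- ===== VERDICT (by name: the statement is the Claim_ definition above) =====
theorem na_binary_spec : Claim_equal_na_binary := by
  intro x _
  unfold Spec_na_binary na_binary
  rw [na_binary_loop_eq x.toNat x le_rfl]
  simp
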